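-- pv_equiv track=rewrite | github.com/inaciovasquez2020/bepty | examples/local_exhaustion_demo.py | cycle_rank
-- ===== SOURCE A (Python) =====
-- def cycle_rank(num_vertices: int, edges: list[tuple[int, int]]) -> int:
--     parent = list(range(num_vertices))
--     rank = [0] * num_vertices
--
--     def find(x: int) -> int:
--         while parent[x] != x:
--             parent[x] = parent[parent[x]]
--             x = parent[x]
--         return x
--
--     def union(a: int, b: int) -> bool:
--         ra, rb = find(a), find(b)
--         if ra == rb:
--             return False
--         if rank[ra] < rank[rb]:
--             parent[ra] = rb
--         elif rank[ra] > rank[rb]: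
--             parent[rb] = ra
--         else:
--             parent[rb] = ra
--             rank[ra] += 1
--         return True
--
--     components = num_vertices
--     for u, v in edges:
--         if union(u, v):
--             components -= 1
--     return len(edges) - num_vertices + components
-- ===== SOURCE B (Python) =====
-- def cycle_rank(num_vertices: int, edges: list[tuple[int, int]]) -> int:
--     labels = list(range(num_vertices))
--     merges = 0
--     for u, v in edges:
--         lu, lv = labels[u], labels[v]
--         if lu != lv:
--             labels = [lu if x == lv else x for x in labels]
--             merges += 1
--     return len(edges) - merges
-- ===== Notes on version B (the rewrite author's own statement) =====
-- stated objective: simpler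
-- what changed: Replaces the union-find (parent forest with path halving and union by rank) by a flat list of component labels that is wholesale-relabelled on each merging edge, and returns len(edges) - merges directly instead of len(edges) - num_vertices + components.
import Mathlib
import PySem

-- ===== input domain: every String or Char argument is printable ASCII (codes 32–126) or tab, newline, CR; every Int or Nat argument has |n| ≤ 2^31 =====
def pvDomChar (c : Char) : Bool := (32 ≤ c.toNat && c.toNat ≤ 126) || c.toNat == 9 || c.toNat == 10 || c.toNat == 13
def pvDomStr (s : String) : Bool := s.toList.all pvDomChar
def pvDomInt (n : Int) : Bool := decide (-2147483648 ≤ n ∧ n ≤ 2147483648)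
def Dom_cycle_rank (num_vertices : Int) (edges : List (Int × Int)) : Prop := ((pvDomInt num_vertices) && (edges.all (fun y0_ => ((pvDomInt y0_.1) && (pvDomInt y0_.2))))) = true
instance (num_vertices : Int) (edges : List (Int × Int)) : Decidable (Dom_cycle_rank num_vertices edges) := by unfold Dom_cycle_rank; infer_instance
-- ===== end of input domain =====

-- B replaces A's union-find (parent forest, path halving, union by rank) by a flat array of
-- component labels merged by wholesale relabelling, and returns len(edges) - merges directly;
-- objective: simpler (shorter, no find/union machinery).  Not claimed faster.

-- ===== PORT A =====
-- while parent[x] != x: parent[x] = parent[parent[x]]; x = parent[x]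
-- (fuel makes the while-loop structural; under Pre_ the union-by-rank invariant bounds every
--  parent chain, so fuel parent.length + 1 is never exhausted — see the lemmas below)
def pvFind (fuel : Nat) (parent : List Int) (x : Int) : List Int × Int :=
  match fuel with
  | 0 => (parent, x)
  | f + 1 =>
    if PySem.List.pyGetD parent x 0 ≠ x then
      let parent' := PySem.List.pySetD parent x
        (PySem.List.pyGetD parent (PySem.List.pyGetD parent x 0) 0)
      pvFind f parent' (PySem.List.pyGetD parent' x 0)
    else (parent, x)

def pvUnion (parent rank : List Int) (a b : Int) : List Int × List Int × Bool :=
  let r1 := pvFind (parent.length + 1) parent a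
  let r2 := pvFind (r1.1.length + 1) r1.1 b
  let p := r2.1
  let ra := r1.2
  let rb := r2.2
  if ra = rb then (p, rank, false)
  else if PySem.List.pyGetD rank ra 0 < PySem.List.pyGetD rank rb 0 then
    (PySem.List.pySetD p ra rb, rank, true)
  else if PySem.List.pyGetD rank rb 0 < PySem.List.pyGetD rank ra 0 then
    (PySem.List.pySetD p rb ra, rank, true)
  else
    (PySem.List.pySetD p rb ra, PySem.List.pySetD rank ra (PySem.List.pyGetD rank ra 0 + 1), true)

def cycle_rank (num_vertices : Int) (edges : List (Int × Int)) : Int :=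
  let st := edges.foldl
    (fun (st : List Int × List Int × Int) e =>
      let r := pvUnion st.1 st.2.1 e.1 e.2
      (r.1, r.2.1, if r.2.2 then st.2.2 - 1 else st.2.2))
    (PySem.List.pyRange 0 num_vertices 1, List.replicate num_vertices.toNat 0, num_vertices)
  PySem.List.len edges - num_vertices + st.2.2

-- ===== PORT B =====
def cycle_rank_alt (num_vertices : Int) (edges : List (Int × Int)) : Int :=
  let st := edges.foldl
    (fun (st : List Int × Int) e =>
      let lu := PySem.List.pyGetD st.1 e.1 0
      let lv := PySem.List.pyGetD st.1 e.2 0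
      if lu ≠ lv then (st.1.map (fun x => if x = lv then lu else x), st.2 + 1) else st)
    (PySem.List.pyRange 0 num_vertices 1, 0)
  PySem.List.len edges - st.2


-- ===== PRECONDITION & SPEC =====
-- Pre_ excludes exactly the inputs on which A raises IndexError: an edge endpoint outside
-- Python's accepted index range [-num_vertices, num_vertices) for the parent list.
def Pre_cycle_rank (num_vertices : Int) (edges : List (Int × Int)) : Prop :=
  ∀ e ∈ edges, (-num_vertices ≤ e.1 ∧ e.1 < num_vertices) ∧ (-num_vertices ≤ e.2 ∧ e.2 < num_vertices)
instance (num_vertices : Int) (edges : List (Int × Int)) : Decidable (Pre_cycle_rank num_vertices edges) := by unfold Pre_cycle_rank; infer_instance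

def pvWitness_cycle_rank : Int × (List (Int × Int)) := (4, [(0, 1), (1, 2), (2, 0), (-1, 0)])

def Spec_cycle_rank (num_vertices : Int) (edges : List (Int × Int)) (out : Int) : Prop := out = cycle_rank_alt num_vertices edges
instance (num_vertices : Int) (edges : List (Int × Int)) (out : Int) : Decidable (Spec_cycle_rank num_vertices edges out) := by unfold Spec_cycle_rank; infer_instance

-- ===== CLAIM (what is proved, stated in full; the proofs are below) =====
def Claim_equal_cycle_rank : Prop := ∀ (num_vertices : Int) (edges : List (Int × Int)), Dom_cycle_rank num_vertices edges → Pre_cycle_rank num_vertices edges → Spec_cycle_rank num_vertices edges (cycle_rank num_vertices edges)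

-- ===== LEMMAS AND PROOFS =====

theorem getD_set_lt (xs : List Int) (i : Nat) (v d : Int) (x : Nat) (h : x < xs.length) :
    (xs.set x v).getD i d = if i = x then v else xs.getD i d := by
  by_cases hix : i = x
  · subst hix; simp [List.getD_eq_getElem?_getD, h]
  · simp [List.getD_eq_getElem?_getD, List.getElem?_set_ne (by omega : x ≠ i), hix]
def pvPf (p : List Int) (i : Nat) : Nat := (p.getD i 0).toNat
def pvRk (r : List Int) (i : Nat) : Int := r.getD i 0
def pvLab (L : List Int) (i : Nat) : Int := L.getD i 0
def pvGood (N : Nat) (p r : List Int) : Prop :=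
  p.length = N ∧ r.length = N ∧
  (∀ i, i < N → 0 ≤ p.getD i 0) ∧
  (∀ i, i < N → pvPf p i < N) ∧
  (∀ i, i < N → pvPf p i ≠ i → pvRk r i < pvRk r (pvPf p i))
def pvR1 (N : Nat) (p L : List Int) : Prop := ∀ i, i < N → pvLab L (pvPf p i) = pvLab L i
def pvR2 (N : Nat) (p L : List Int) : Prop :=
  ∀ i j, i < N → j < N → pvPf p i = i → pvPf p j = j → pvLab L i = pvLab L j → i = j

-- pvPf of a set list
theorem pvPf_set (p : List Int) (x : Nat) (v : Int) (i : Nat) (h : x < p.length) :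
    pvPf (p.set x v) i = if i = x then v.toNat else pvPf p i := by
  unfold pvPf; rw [getD_set_lt _ _ _ _ _ h]; split <;> rfl

theorem pvHalve (N : Nat) (p r L : List Int) (x : Nat)
    (hG : pvGood N p r) (h1 : pvR1 N p L) (h2 : pvR2 N p L)
    (hx : x < N) (hne : pvPf p x ≠ x) :
    pvGood N (p.set x (p.getD (pvPf p x) 0)) r ∧
    pvR1 N (p.set x (p.getD (pvPf p x) 0)) L ∧
    pvR2 N (p.set x (p.getD (pvPf p x) 0)) L ∧
    (∀ i, i < N → (pvPf (p.set x (p.getD (pvPf p x) 0)) i = i ↔ pvPf p i = i)) ∧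
    pvRk r x < pvRk r (pvPf p (pvPf p x)) := by
  obtain ⟨hlen, hrlen, hpos, hbnd, hrk⟩ := hG
  have hxlen : x < p.length := by omega
  have hfx : pvPf p x < N := hbnd x hx
  -- the new value is (pvPf p (pvPf p x)) as an Int
  have hval : p.getD (pvPf p x) 0 = ((pvPf p (pvPf p x) : Nat) : Int) := by
    exact (Int.toNat_of_nonneg (hpos _ hfx)).symm
  have hpf' : ∀ i, pvPf (p.set x (p.getD (pvPf p x) 0)) i
      = if i = x then pvPf p (pvPf p x) else pvPf p i := by
    intro i
    rw [pvPf_set _ _ _ _ hxlen, hval]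
    split <;> simp
  have hrklt : pvRk r x < pvRk r (pvPf p (pvPf p x)) := by
    have h1' := hrk x hx hne
    by_cases hroot : pvPf p (pvPf p x) = pvPf p x
    · rw [hroot]; exact h1'
    · exact lt_trans h1' (hrk (pvPf p x) hfx hroot)
  have hffx : pvPf p (pvPf p x) < N := hbnd _ hfx
  have hnotx : pvPf p (pvPf p x) ≠ x := by
    intro h
    rw [h] at hrklt
    omega
  refine ⟨⟨by simp [hlen], hrlen, ?_, ?_, ?_⟩, ?_, ?_, ?_, hrklt⟩
  · intro i hi
    rw [getD_set_lt _ _ _ _ _ hxlen]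
    split
    · rw [hval]; positivity
    · exact hpos i hi
  · intro i hi
    rw [hpf']
    split
    · exact hffx
    · exact hbnd i hi
  · intro i hi hnei
    rw [hpf'] at hnei ⊢
    split at hnei
    · next heq => subst heq; split; · exact hrklt
                  · omega
    · next hne2 => rw [if_neg hne2]; exact hrk i hi hnei
  · intro i hi
    rw [hpf']
    split
    · next heq =>
      rw [heq]
      calc pvLab L (pvPf p (pvPf p x)) = pvLab L (pvPf p x) := h1 (pvPf p x) hfx
        _ = pvLab L x := h1 x hx
    · exact h1 i hi
  · -- R2: roots unchanged
    intro i j hi hj hri hrj hlij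
    rw [hpf'] at hri hrj
    split at hri
    · next heq => rw [heq] at hri; exact absurd hri hnotx
    · split at hrj
      · next heq => rw [heq] at hrj; exact absurd hrj hnotx
      · exact h2 i j hi hj hri hrj hlij
  · intro i hi
    rw [hpf']
    split
    · next heq =>
      subst heq
      constructor
      · intro h; exact absurd h hnotx
      · intro h; exact absurd h hne
    · exact Iff.rfl

def pvM (N : Nat) (r : List Int) (i : Nat) : Nat :=
  ((Finset.range N).filter (fun j => pvRk r i < pvRk r j)).card
theorem pvM_lt (N : Nat) (r : List Int) (i : Nat) (hi : i < N) : pvM N r i < N := by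
  unfold pvM
  have h : ((Finset.range N).filter (fun j => pvRk r i < pvRk r j)) ⊂ Finset.range N := by
    constructor
    · exact Finset.filter_subset _ _
    · intro hsub
      have := hsub (Finset.mem_range.mpr hi)
      simp [Finset.mem_filter] at this
  calc ((Finset.range N).filter (fun j => pvRk r i < pvRk r j)).card
      < (Finset.range N).card := Finset.card_lt_card h
    _ = N := Finset.card_range N
theorem pvM_decreases (N : Nat) (r : List Int) (x y : Nat) (hy : y < N)
    (hrk : pvRk r x < pvRk r y) : pvM N r y < pvM N r x := by
  unfold pvM
  apply Finset.card_lt_card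
  constructor
  · intro j hj
    simp [Finset.mem_filter] at hj ⊢
    exact ⟨hj.1, lt_trans hrk hj.2⟩
  · intro hsub
    have := hsub (by simp [Finset.mem_filter]; exact ⟨hy, hrk⟩)
    simp [Finset.mem_filter] at this
theorem pvFind_ok (N : Nat) (r L : List Int) :
    ∀ (fuel : Nat) (p : List Int) (x : Nat),
      pvGood N p r → pvR1 N p L → pvR2 N p L → x < N → pvM N r x < fuel →
      ∃ (p' : List Int) (root : Nat), pvFind fuel p (x : Int) = (p', (root : Int)) ∧
        root < N ∧ pvPf p' root = root ∧ pvLab L root = pvLab L x ∧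
        pvGood N p' r ∧ pvR1 N p' L ∧ pvR2 N p' L ∧
        (∀ i, i < N → (pvPf p' i = i ↔ pvPf p i = i)) := by
  intro fuel
  induction fuel with
  | zero => intro p x _ _ _ _ hm; omega
  | succ f ih =>
    intro p x hG h1 h2 hx hm
    have hlen := hG.1
    have hpos := hG.2.2.1
    have hxval : PySem.List.pyGetD p (x : Int) 0 = ((pvPf p x : Nat) : Int) := by
      rw [PySem.List.pyGetD_natCast]
      exact (Int.toNat_of_nonneg (hpos x hx)).symm
    by_cases hroot : pvPf p x = x
    · refine ⟨p, x, ?_, hx, hroot, rfl, hG, h1, h2, fun i _ => Iff.rfl⟩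
      rw [pvFind]
      rw [if_neg]
      simp [hxval, hroot]
    · have hcond : PySem.List.pyGetD p (x : Int) 0 ≠ (x : Int) := by
        rw [hxval]; exact_mod_cast fun h => hroot (by exact_mod_cast h)
      have hfx : pvPf p x < N := hG.2.2.2.1 x hx
      have hp' : PySem.List.pySetD p (x : Int) (PySem.List.pyGetD p (PySem.List.pyGetD p (x : Int) 0) 0)
          = p.set x (p.getD (pvPf p x) 0) := by
        rw [hxval, PySem.List.pyGetD_natCast, PySem.List.pySetD_natCast]
      obtain ⟨hG', h1', h2', hriff, hrklt⟩ := pvHalve N p r L x hG h1 h2 hx hroot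
      have hval2 : p.getD (pvPf p x) 0 = ((pvPf p (pvPf p x) : Nat) : Int) :=
        (Int.toNat_of_nonneg (hpos _ hfx)).symm
      have hnext : PySem.List.pyGetD (p.set x (p.getD (pvPf p x) 0)) (x : Int) 0
          = ((pvPf p (pvPf p x) : Nat) : Int) := by
        rw [PySem.List.pyGetD_natCast, getD_set_lt _ _ _ _ _ (by omega), if_pos rfl, hval2]
      have hffx : pvPf p (pvPf p x) < N := hG.2.2.2.1 _ hfx
      have hm' : pvM N r (pvPf p (pvPf p x)) < f := by
        have := pvM_decreases N r x (pvPf p (pvPf p x)) hffx hrklt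
        omega
      obtain ⟨p'', root, heq, h3, h4, h5, h6, h7, h8, h9⟩ :=
        ih (p.set x (p.getD (pvPf p x) 0)) (pvPf p (pvPf p x)) hG' h1' h2' hffx hm'
      refine ⟨p'', root, ?_, h3, h4, ?_, h6, h7, h8, ?_⟩
      · rw [pvFind, if_pos hcond]
        simp only [hp', hnext]
        exact heq
      · calc pvLab L root = pvLab L (pvPf p (pvPf p x)) := h5
          _ = pvLab L (pvPf p x) := h1 (pvPf p x) hfx
          _ = pvLab L x := h1 x hx
      · intro i hi
        rw [h9 i hi, hriff i hi]

theorem pyGetD_negIdx (xs : List Int) (x : Int) (N : Nat) (h : xs.length = N) (h1 : -(N:Int) ≤ x) (h2 : x < 0) (d : Int) :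
    PySem.List.pyGetD xs x d = xs.getD (x + N).toNat d := by
  simp [PySem.List.pyGetD, PySem.List.pyGet?, PySem.List.pyIdx?]
  rw [if_neg (by omega), if_pos (by omega)]
  simp
  congr 2
  omega

theorem pySetD_negIdx (xs : List Int) (x : Int) (N : Nat) (h : xs.length = N) (h1 : -(N:Int) ≤ x) (h2 : x < 0) (v : Int) :
    PySem.List.pySetD xs x v = xs.set (x + N).toNat v := by
  simp [PySem.List.pySetD, PySem.List.pySet?, PySem.List.pyIdx?]
  rw [if_neg (by omega), if_pos (by omega)]
  simp
  congr 1
  omega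
def pvIx (N : Nat) (x : Int) : Nat := (if x < 0 then x + N else x).toNat

theorem pyGetD_ix (N : Nat) (xs : List Int) (x : Int) (h : xs.length = N)
    (hx1 : -(N:Int) ≤ x) (_hx2 : x < N) (d : Int) :
    PySem.List.pyGetD xs x d = xs.getD (pvIx N x) d := by
  by_cases h0 : x < 0
  · rw [pyGetD_negIdx xs x N h hx1 h0]; unfold pvIx; rw [if_pos h0]
  · have hx : x = ((x.toNat : Nat) : Int) := by omega
    rw [hx, PySem.List.pyGetD_natCast]
    unfold pvIx
    rw [if_neg (by omega)]
    simp
    rw [max_eq_left (by omega : (0:Int) ≤ x)]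

theorem pvFind_ok_int (N : Nat) (r L : List Int) (p : List Int) (x : Int)
    (hG : pvGood N p r) (h1 : pvR1 N p L) (h2 : pvR2 N p L)
    (hx1 : -(N:Int) ≤ x) (hx2 : x < N) :
    ∃ (p' : List Int) (root : Nat), pvFind (p.length + 1) p x = (p', (root : Int)) ∧
      root < N ∧ pvPf p' root = root ∧ pvLab L root = pvLab L (pvIx N x) ∧
      pvGood N p' r ∧ pvR1 N p' L ∧ pvR2 N p' L ∧
      (∀ i, i < N → (pvPf p' i = i ↔ pvPf p i = i)) := by
  have hlen : p.length = N := hG.1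
  have hpos := hG.2.2.1
  by_cases h0 : x < 0
  · -- negative index: one unfolding step, then pvFind_ok
    have hN1 : 1 ≤ N := by omega
    set nx := (x + N).toNat with hnxdef
    have hnx : nx < N := by omega
    have hixeq : pvIx N x = nx := by unfold pvIx; rw [if_pos h0]
    have hread : PySem.List.pyGetD p x 0 = p.getD nx 0 := pyGetD_negIdx p x N hlen hx1 h0 0
    have hnxv : p.getD nx 0 = ((pvPf p nx : Nat) : Int) := (Int.toNat_of_nonneg (hpos nx hnx)).symm
    have hcond : PySem.List.pyGetD p x 0 ≠ x := by rw [hread, hnxv]; omega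
    have hwrite : ∀ v, PySem.List.pySetD p x v = p.set nx v := fun v => pySetD_negIdx p x N hlen hx1 h0 v
    have hfnx : pvPf p nx < N := hG.2.2.2.1 nx hnx
    have hval : PySem.List.pyGetD p (PySem.List.pyGetD p x 0) 0 = p.getD (pvPf p nx) 0 := by
      rw [hread, hnxv, PySem.List.pyGetD_natCast]
    have hnext : PySem.List.pyGetD (p.set nx (p.getD (pvPf p nx) 0)) x 0
        = ((pvPf p (pvPf p nx) : Nat) : Int) := by
      rw [pyGetD_negIdx _ x N (by simp [hlen]) hx1 h0, ← hnxdef,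
        getD_set_lt _ _ _ _ _ (by omega), if_pos rfl]
      exact (Int.toNat_of_nonneg (hpos _ hfnx)).symm
    rw [hlen, pvFind, if_pos hcond]
    simp only [hwrite, hval]
    by_cases hroot : pvPf p nx = nx
    · -- nx is already a root: the write is a no-op
      have hsame : p.set nx (p.getD (pvPf p nx) 0) = p := by
        rw [hroot, List.getD_eq_getElem p 0 (by omega)]
        exact List.set_getElem_self (by omega)
      rw [hsame] at hnext ⊢
      rw [hnext, hroot, hroot]
      obtain ⟨p', root, heq, hc⟩ := pvFind_ok N r L N p nx hG h1 h2 hnx (pvM_lt N r nx hnx)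
      exact ⟨p', root, heq, by rw [hixeq]; exact hc⟩
    · obtain ⟨hG', h1', h2', hriff, hrklt⟩ := pvHalve N p r L nx hG h1 h2 hnx hroot
      have hffx : pvPf p (pvPf p nx) < N := hG.2.2.2.1 _ hfnx
      have hm' : pvM N r (pvPf p (pvPf p nx)) < N := by
        have ha := pvM_decreases N r nx (pvPf p (pvPf p nx)) hffx hrklt
        have hb := pvM_lt N r nx hnx
        omega
      rw [hnext]
      obtain ⟨p'', root, heq, h3, h4, h5, h6, h7, h8, h9⟩ :=
        pvFind_ok N r L N (p.set nx (p.getD (pvPf p nx) 0)) (pvPf p (pvPf p nx)) hG' h1' h2' hffx hm'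
      refine ⟨p'', root, heq, h3, h4, ?_, h6, h7, h8, fun i hi => (h9 i hi).trans (hriff i hi)⟩
      rw [hixeq]
      calc pvLab L root = pvLab L (pvPf p (pvPf p nx)) := h5
        _ = pvLab L (pvPf p nx) := h1 (pvPf p nx) hfnx
        _ = pvLab L nx := h1 nx hnx
  · -- nonnegative index
    have hx : x = ((x.toNat : Nat) : Int) := by omega
    have hixeq : pvIx N x = x.toNat := by unfold pvIx; rw [if_neg h0]
    have hnx : x.toNat < N := by omega
    obtain ⟨p', root, heq, c1, c2, c3, rest⟩ :=
      pvFind_ok N r L (N + 1) p x.toNat hG h1 h2 hnx (by have := pvM_lt N r x.toNat hnx; omega)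
    refine ⟨p', root, ?_, c1, c2, ?_, rest⟩
    · rw [hlen, hx]; exact heq
    · rw [hixeq]; exact c3

theorem pvPf_set2 (p : List Int) (x : Nat) (v : Int) (i : Nat) (h : x < p.length) :
    pvPf (p.set x v) i = if i = x then v.toNat else pvPf p i := by
  unfold pvPf; rw [getD_set_lt _ _ _ _ _ h]; split <;> rfl

-- bumping the rank of a root preserves pvGood
theorem pvBump (N : Nat) (p r : List Int) (ra : Nat)
    (hG : pvGood N p r) (hra : ra < N) (hroot : pvPf p ra = ra) :
    pvGood N p (r.set ra (pvRk r ra + 1)) := by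
  obtain ⟨hlen, hrlen, hpos, hbnd, hrk⟩ := hG
  refine ⟨hlen, by simp [hrlen], hpos, hbnd, ?_⟩
  intro i hi hne
  have h1 : pvRk (r.set ra (pvRk r ra + 1)) i = if i = ra then pvRk r ra + 1 else pvRk r i := by
    unfold pvRk; rw [getD_set_lt _ _ _ _ _ (by omega)]
  have h2 : pvRk (r.set ra (pvRk r ra + 1)) (pvPf p i) = if pvPf p i = ra then pvRk r ra + 1 else pvRk r (pvPf p i) := by
    unfold pvRk; rw [getD_set_lt _ _ _ _ _ (by omega)]
  rw [h1, h2]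
  have hia : i ≠ ra := fun h => hne (by rw [h, hroot])
  rw [if_neg hia]
  have := hrk i hi hne
  split
  · next h => rw [h] at this; omega
  · omega

-- linking root lk under root ot (lk gets parent ot) preserves pvGood when rk lk < rk ot
theorem pvLinkG (N : Nat) (p r : List Int) (lk ot : Nat)
    (hG : pvGood N p r) (hlk : lk < N) (hot : ot < N) (hne : lk ≠ ot)
    (hrk : pvRk r lk < pvRk r ot) :
    pvGood N (p.set lk (ot : Int)) r := by
  obtain ⟨hlen, hrlen, hpos, hbnd, hrke⟩ := hG
  refine ⟨by simp [hlen], hrlen, ?_, ?_, ?_⟩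
  · intro i hi
    rw [getD_set_lt _ _ _ _ _ (by omega)]
    split
    · positivity
    · exact hpos i hi
  · intro i hi
    rw [pvPf_set2 _ _ _ _ (by omega)]
    split
    · simpa using hot
    · exact hbnd i hi
  · intro i hi hnei
    rw [pvPf_set2 _ _ _ _ (by omega)] at hnei ⊢
    split at hnei
    · next heq => subst heq; rw [if_pos rfl]; simpa using hrk
    · next hne2 => rw [if_neg hne2]; exact hrke i hi hnei

theorem getD_map_lt (f : Int → Int) (xs : List Int) (i : Nat) (d : Int) (h : i < xs.length) :
    (xs.map f).getD i d = f (xs.getD i d) := by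
  simp [List.getD_eq_getElem?_getD, List.getElem?_eq_getElem h]

-- linking two distinct roots and relabelling rb's label onto ra's preserves pvR1/pvR2
theorem pvLink_labels (N : Nat) (p L : List Int) (ra rb lk ot : Nat)
    (h1 : pvR1 N p L) (h2 : pvR2 N p L)
    (hra : ra < N) (hrb : rb < N)
    (hroota : pvPf p ra = ra) (hrootb : pvPf p rb = rb) (hne : ra ≠ rb)
    (hcase : (lk = ra ∧ ot = rb) ∨ (lk = rb ∧ ot = ra))
    (hL : L.length = N) (hplen : p.length = N) (hbnd : ∀ i, i < N → pvPf p i < N) :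
    pvR1 N (p.set lk (ot : Int)) (L.map (fun t => if t = pvLab L rb then pvLab L ra else t)) ∧
    pvR2 N (p.set lk (ot : Int)) (L.map (fun t => if t = pvLab L rb then pvLab L ra else t)) := by
  have hlk : lk < N := by rcases hcase with ⟨h, _⟩ | ⟨h, _⟩ <;> omega
  have hot : ot < N := by rcases hcase with ⟨_, h⟩ | ⟨_, h⟩ <;> omega
  have hlvne : pvLab L ra ≠ pvLab L rb := fun h => hne (h2 ra rb hra hrb hroota hrootb h)
  have hlab' : ∀ i, i < N → pvLab (L.map (fun t => if t = pvLab L rb then pvLab L ra else t)) i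
      = if pvLab L i = pvLab L rb then pvLab L ra else pvLab L i := by
    intro i hi
    unfold pvLab
    rw [getD_map_lt _ _ _ _ (by omega)]
  have hpf3 : ∀ i, pvPf (p.set lk (ot : Int)) i = if i = lk then ot else pvPf p i := by
    intro i
    rw [pvPf_set2 _ _ _ _ (by omega)]
    split <;> simp
  constructor
  · intro i hi
    have hfi : pvPf p i < N := hbnd i hi
    rw [hpf3]
    split
    · next heq =>
      -- i = lk: new parent is ot; labels of ra and rb both map to pvLab L ra
      rw [hlab' ot hot, hlab' i hi]
      subst heq
      rcases hcase with ⟨hl, ho⟩ | ⟨hl, ho⟩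
      · subst hl ho
        rw [if_pos rfl, if_neg hlvne]
      · subst hl ho
        rw [if_neg hlvne, if_pos rfl]
    · rw [hlab' (pvPf p i) hfi, hlab' i hi, h1 i hi]
  · intro i j hi hj hri hrj hlij
    rw [hpf3] at hri hrj
    rw [hlab' i hi, hlab' j hj] at hlij
    have hilk : i ≠ lk := by
      intro h
      rw [if_pos h] at hri
      omega
    have hjlk : j ≠ lk := by
      intro h
      rw [if_pos h] at hrj
      omega
    rw [if_neg hilk] at hri
    rw [if_neg hjlk] at hrj
    split at hlij <;> split at hlij
    · next ha hb => exact h2 i j hi hj hri hrj (ha.trans hb.symm)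
    · next ha hb =>
      -- lab i = lab rb, lab j = lab ra  →  i = rb, j = ra
      exfalso
      have hieq : i = rb := h2 i rb hi hrb hri hrootb ha
      have hjeq : j = ra := h2 j ra hj hra hrj hroota hlij.symm
      rcases hcase with ⟨hl, _⟩ | ⟨hl, _⟩
      · exact hjlk (hjeq.trans hl.symm)
      · exact hilk (hieq.trans hl.symm)
    · next ha hb =>
      exfalso
      have hjeq : j = rb := h2 j rb hj hrb hrj hrootb hb
      have hieq : i = ra := h2 i ra hi hra hri hroota hlij
      rcases hcase with ⟨hl, _⟩ | ⟨hl, _⟩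
      · exact hilk (hieq.trans hl.symm)
      · exact hjlk (hjeq.trans hl.symm)
    · next ha hb => exact h2 i j hi hj hri hrj hlij

theorem pvUnion_eval (p r : List Int) (a b : Int) (p1 p2 : List Int) (ra rb : Int)
    (e1 : pvFind (p.length + 1) p a = (p1, ra)) (e2 : pvFind (p1.length + 1) p1 b = (p2, rb)) :
    pvUnion p r a b =
      if ra = rb then (p2, r, false)
      else if PySem.List.pyGetD r ra 0 < PySem.List.pyGetD r rb 0 then
        (PySem.List.pySetD p2 ra rb, r, true)
      else if PySem.List.pyGetD r rb 0 < PySem.List.pyGetD r ra 0 then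
        (PySem.List.pySetD p2 rb ra, r, true)
      else
        (PySem.List.pySetD p2 rb ra, PySem.List.pySetD r ra (PySem.List.pyGetD r ra 0 + 1), true) := by
  simp only [pvUnion, e1]
  simp only [e2]

theorem pvStep (N : Nat) (p r L : List Int) (a b : Int)
    (hG : pvGood N p r) (h1 : pvR1 N p L) (h2 : pvR2 N p L) (hL : L.length = N)
    (ha1 : -(N:Int) ≤ a) (ha2 : a < N) (hb1 : -(N:Int) ≤ b) (hb2 : b < N) :
    ∃ p'' r'',
      pvUnion p r a b = (p'', r'',
        decide (PySem.List.pyGetD L a 0 ≠ PySem.List.pyGetD L b 0)) ∧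
      (let L' := if PySem.List.pyGetD L a 0 ≠ PySem.List.pyGetD L b 0 then
          L.map (fun x => if x = PySem.List.pyGetD L b 0 then PySem.List.pyGetD L a 0 else x) else L
       pvGood N p'' r'' ∧ pvR1 N p'' L' ∧ pvR2 N p'' L' ∧ L'.length = N) := by
  obtain ⟨p1, ra, e1, hraN, hrootra1, hlabra, hG1, h11, h21, hiff1⟩ :=
    pvFind_ok_int N r L p a hG h1 h2 ha1 ha2
  obtain ⟨p2, rb, e2, hrbN, hrootrb, hlabrb, hG2, h12, h22, hiff2⟩ :=
    pvFind_ok_int N r L p1 b hG1 h11 h21 hb1 hb2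
  have hrootra : pvPf p2 ra = ra := (hiff2 ra hraN).mpr hrootra1
  have hEval := pvUnion_eval p r a b p1 p2 (↑ra) (↑rb) e1 e2
  have hluv : PySem.List.pyGetD L a 0 = pvLab L ra := by
    rw [pyGetD_ix N L a hL ha1 ha2]; exact hlabra.symm
  have hlvv : PySem.List.pyGetD L b 0 = pvLab L rb := by
    rw [pyGetD_ix N L b hL hb1 hb2]; exact hlabrb.symm
  have hrkra : PySem.List.pyGetD r (ra : Int) 0 = pvRk r ra := by
    rw [PySem.List.pyGetD_natCast]; rfl
  have hrkrb : PySem.List.pyGetD r (rb : Int) 0 = pvRk r rb := by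
    rw [PySem.List.pyGetD_natCast]; rfl
  have hbnd2 := hG2.2.2.2.1
  have hp2len : p2.length = N := hG2.1
  by_cases hrr : ra = rb
  · -- no merge
    have hll : pvLab L ra = pvLab L rb := by rw [hrr]
    refine ⟨p2, r, ?_, ?_⟩
    · rw [hEval, if_pos (by exact_mod_cast hrr)]
      simp [hluv, hlvv, hll]
    · have hcond : ¬ (PySem.List.pyGetD L a 0 ≠ PySem.List.pyGetD L b 0) := by
        rw [hluv, hlvv, hll]; simp
      simp only [if_neg hcond]
      exact ⟨hG2, h12, h22, hL⟩
  · -- merge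
    have hll : pvLab L ra ≠ pvLab L rb := by
      intro h
      exact hrr (h22 ra rb hraN hrbN hrootra hrootrb h)
    have hcond : (PySem.List.pyGetD L a 0 ≠ PySem.List.pyGetD L b 0) := by
      rw [hluv, hlvv]; exact hll
    have hmapeq : (fun x => if x = PySem.List.pyGetD L b 0 then PySem.List.pyGetD L a 0 else x)
        = (fun t => if t = pvLab L rb then pvLab L ra else t) := by
      funext t; rw [hluv, hlvv]
    have hLlen' : (L.map (fun t => if t = pvLab L rb then pvLab L ra else t)).length = N := by
      simp [hL]
    rw [hEval, if_neg (by exact_mod_cast hrr)]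
    rw [hrkra, hrkrb]
    by_cases hc1 : pvRk r ra < pvRk r rb
    · -- parent[ra] := rb
      rw [if_pos hc1]
      refine ⟨p2.set ra (rb : Int), r, ?_, ?_⟩
      · simp [hcond]
      · simp only [if_pos hcond, hmapeq]
        obtain ⟨hr1', hr2'⟩ := pvLink_labels N p2 L ra rb ra rb h12 h22 hraN hrbN
          hrootra hrootrb hrr (Or.inl ⟨rfl, rfl⟩) hL hp2len hbnd2
        exact ⟨pvLinkG N p2 r ra rb hG2 hraN hrbN hrr hc1, hr1', hr2', hLlen'⟩
    · rw [if_neg hc1]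
      by_cases hc2 : pvRk r rb < pvRk r ra
      · -- parent[rb] := ra
        rw [if_pos hc2]
        refine ⟨p2.set rb (ra : Int), r, ?_, ?_⟩
        · simp [hcond]
        · simp only [if_pos hcond, hmapeq]
          obtain ⟨hr1', hr2'⟩ := pvLink_labels N p2 L ra rb rb ra h12 h22 hraN hrbN
            hrootra hrootrb hrr (Or.inr ⟨rfl, rfl⟩) hL hp2len hbnd2
          exact ⟨pvLinkG N p2 r rb ra hG2 hrbN hraN (fun h => hrr h.symm) hc2, hr1', hr2', hLlen'⟩
      · -- equal ranks: parent[rb] := ra, rank[ra] += 1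
        rw [if_neg hc2]
        have hceq : pvRk r rb = pvRk r ra := by omega
        refine ⟨p2.set rb (ra : Int), r.set ra (pvRk r ra + 1), ?_, ?_⟩
        · simp [hcond]
        · simp only [if_pos hcond, hmapeq]
          obtain ⟨hr1', hr2'⟩ := pvLink_labels N p2 L ra rb rb ra h12 h22 hraN hrbN
            hrootra hrootrb hrr (Or.inr ⟨rfl, rfl⟩) hL hp2len hbnd2
          have hGb := pvBump N p2 r ra hG2 hraN hrootra
          have hrk' : pvRk (r.set ra (pvRk r ra + 1)) rb < pvRk (r.set ra (pvRk r ra + 1)) ra := by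
            unfold pvRk
            rw [getD_set_lt _ _ _ _ _ (by rw [hG.2.1]; omega), getD_set_lt _ _ _ _ _ (by rw [hG.2.1]; omega)]
            rw [if_neg (fun h => hrr h.symm), if_pos rfl]
            have : pvRk r rb = pvRk r ra := hceq
            unfold pvRk at this
            omega
          exact ⟨pvLinkG N p2 (r.set ra (pvRk r ra + 1)) rb ra hGb hrbN hraN
            (fun h => hrr h.symm) hrk', hr1', hr2', hLlen'⟩

theorem pvLoop (N : Nat) :
    ∀ (edges : List (Int × Int)) (p r L : List Int) (c m : Int),
      pvGood N p r → pvR1 N p L → pvR2 N p L → L.length = N →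
      (∀ e ∈ edges, (-(N:Int) ≤ e.1 ∧ e.1 < N) ∧ (-(N:Int) ≤ e.2 ∧ e.2 < N)) →
      (edges.foldl
        (fun (st : List Int × List Int × Int) e =>
          let x := pvUnion st.1 st.2.1 e.1 e.2
          (x.1, x.2.1, if x.2.2 then st.2.2 - 1 else st.2.2)) (p, r, c)).2.2 +
      (edges.foldl
        (fun (st : List Int × Int) e =>
          let lu := PySem.List.pyGetD st.1 e.1 0
          let lv := PySem.List.pyGetD st.1 e.2 0
          if lu ≠ lv then (st.1.map (fun x => if x = lv then lu else x), st.2 + 1) else st) (L, m)).2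
      = c + m := by
  intro edges
  induction edges with
  | nil => intro p r L c m _ _ _ _ _; rfl
  | cons e es ih =>
    intro p r L c m hG h1 h2 hL hb
    have hbe := hb e (by simp)
    obtain ⟨p'', r'', heq, hinv⟩ :=
      pvStep N p r L e.1 e.2 hG h1 h2 hL hbe.1.1 hbe.1.2 hbe.2.1 hbe.2.2
    simp only [List.foldl_cons, heq]
    by_cases hd : PySem.List.pyGetD L e.1 0 ≠ PySem.List.pyGetD L e.2 0
    · simp only [if_pos hd]
      simp only [if_pos hd] at hinv
      rw [if_pos (decide_eq_true hd)]
      have h1' := ih p'' r''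
        (L.map (fun x => if x = PySem.List.pyGetD L e.2 0 then PySem.List.pyGetD L e.1 0 else x))
        (c - 1) (m + 1) hinv.1 hinv.2.1 hinv.2.2.1 hinv.2.2.2 (fun e' he' => hb e' (by simp [he']))
      exact h1'.trans (by ring)
    · simp only [if_neg hd]
      simp only [if_neg hd] at hinv
      rw [if_neg (by simp [hd] : ¬ (decide (PySem.List.pyGetD L e.1 0 ≠ PySem.List.pyGetD L e.2 0) = true))]
      exact ih p'' r'' L c m hinv.1 hinv.2.1 hinv.2.2.1 hinv.2.2.2 (fun e' he' => hb e' (by simp [he']))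

-- the initial state (parent = labels = range(n), rank = zeros) satisfies all invariants
theorem pvInit (nv : Int) (_hnv : 0 ≤ nv) :
    pvGood nv.toNat (PySem.List.pyRange 0 nv 1) (List.replicate nv.toNat 0) ∧
    pvR1 nv.toNat (PySem.List.pyRange 0 nv 1) (PySem.List.pyRange 0 nv 1) ∧
    pvR2 nv.toNat (PySem.List.pyRange 0 nv 1) (PySem.List.pyRange 0 nv 1) ∧
    (PySem.List.pyRange 0 nv 1).length = nv.toNat := by
  have hlen : (PySem.List.pyRange 0 nv 1).length = nv.toNat := by
    rw [PySem.List.length_pyRange_one]; simp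
  have hget : ∀ i, i < nv.toNat → (PySem.List.pyRange 0 nv 1).getD i 0 = (i : Int) := by
    intro i hi
    rw [List.getD_eq_getElem _ _ (by omega), PySem.List.getElem_pyRange_one]
    simp
  have hpf : ∀ i, i < nv.toNat → pvPf (PySem.List.pyRange 0 nv 1) i = i := by
    intro i hi
    unfold pvPf
    rw [hget i hi]
    simp
  refine ⟨⟨hlen, by simp, ?_, ?_, ?_⟩, ?_, ?_, hlen⟩
  · intro i hi; rw [hget i hi]; positivity
  · intro i hi; rw [hpf i hi]; exact hi
  · intro i hi hne; exact absurd (hpf i hi) hne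
  · intro i hi; rw [hpf i hi]
  · intro i j hi hj _ _ hlab
    unfold pvLab at hlab
    rw [hget i hi, hget j hj] at hlab
    exact_mod_cast hlab


-- ===== VERDICT (by name: the statement is the Claim_ definition above) =====
theorem cycle_rank_spec : Claim_equal_cycle_rank := by
  intro nv edges _ hpre
  show cycle_rank nv edges = cycle_rank_alt nv edges
  by_cases hnv : 0 ≤ nv
  · have hcast : ((nv.toNat : Nat) : Int) = nv := Int.toNat_of_nonneg hnv
    obtain ⟨hG0, h10, h20, hL0⟩ := pvInit nv hnv
    have hb : ∀ e ∈ edges, (-(nv.toNat : Int) ≤ e.1 ∧ e.1 < (nv.toNat : Int)) ∧ (-(nv.toNat : Int) ≤ e.2 ∧ e.2 < (nv.toNat : Int)) := by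
      intro e he
      have := hpre e he
      constructor <;> constructor <;> omega
    have hloop := pvLoop nv.toNat edges (PySem.List.pyRange 0 nv 1) (List.replicate nv.toNat 0)
      (PySem.List.pyRange 0 nv 1) nv 0 hG0 h10 h20 hL0 hb
    have hA : cycle_rank nv edges = PySem.List.len edges - nv + (edges.foldl
        (fun (st : List Int × List Int × Int) e =>
          let x := pvUnion st.1 st.2.1 e.1 e.2
          (x.1, x.2.1, if x.2.2 then st.2.2 - 1 else st.2.2))
        (PySem.List.pyRange 0 nv 1, List.replicate nv.toNat 0, nv)).2.2 := rfl
    have hB : cycle_rank_alt nv edges = PySem.List.len edges - (edges.foldl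
        (fun (st : List Int × Int) e =>
          let lu := PySem.List.pyGetD st.1 e.1 0
          let lv := PySem.List.pyGetD st.1 e.2 0
          if lu ≠ lv then (st.1.map (fun x => if x = lv then lu else x), st.2 + 1) else st)
        (PySem.List.pyRange 0 nv 1, 0)).2 := rfl
    rw [hA, hB, PySem.List.len_eq]
    omega
  · cases edges with
    | nil => simp [cycle_rank, cycle_rank_alt]
    | cons e es =>
      exfalso
      have := hpre e (by simp)
      omega
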